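-- pv_equiv track=rewrite | github.com/Habuon/AdventOfCode | 2020/14thDay/1/solve.py | process
-- ===== SOURCE A (Python) =====
-- def process(mask, value):
--     res = list(bin(int(value))[2:])
--     while len(res) < 36:
--         res = ["0"] + res
--     for i in range(len(mask)):
--         if mask[i] == "X":
--             continue
--         res[i] = mask[i]
--     return int("".join(res), 2)
-- ===== SOURCE B (Python) =====
-- def process(mask, value):
--     # integer bitmask composition instead of character-string surgery
--     v = int(value)
--     L = max(36, v.bit_length())
--     or_mask = 0
--     and_mask = (1 << L) - 1
--     for i, c in enumerate(mask):
--         if c == "1":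
--             or_mask |= 1 << (L - 1 - i)
--         elif c == "0":
--             and_mask ^= 1 << (L - 1 - i)
--     return (v & and_mask) | or_mask
-- ===== Notes on version B (the rewrite author's own statement) =====
-- stated objective: idiomatic
-- what changed: B replaces A's list-of-characters surgery (pad a binary string to 36 digits, overwrite characters, re-parse with int(...,2)) by composing an or-mask and an and-mask as integers in one scan of the mask and applying them with bitwise &,|,^.
-- outside the precondition, e.g. on process('1_', 5): A returns 17179869189, B returns 34359738373; on process('000000000000000000000000000000000000', -5): A returns 0, B returns 0; on process(' ', 5): A returns 5, B returns 5
import Mathlib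
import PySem

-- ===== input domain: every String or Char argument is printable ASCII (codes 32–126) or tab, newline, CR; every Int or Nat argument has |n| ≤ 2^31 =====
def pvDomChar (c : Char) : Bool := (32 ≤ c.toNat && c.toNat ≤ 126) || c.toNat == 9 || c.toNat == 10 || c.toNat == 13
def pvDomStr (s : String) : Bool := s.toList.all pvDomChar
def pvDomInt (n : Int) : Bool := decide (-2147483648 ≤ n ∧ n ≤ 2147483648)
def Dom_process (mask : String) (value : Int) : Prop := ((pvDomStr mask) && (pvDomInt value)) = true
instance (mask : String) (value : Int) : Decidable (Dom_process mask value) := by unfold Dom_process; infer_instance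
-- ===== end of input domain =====

-- B replaces A's character-by-character overwrite of a padded binary string by composing
-- two integer bitmasks in one scan of the mask and applying them with &,|,^ (objective: idiomatic).

-- shared neutral helper: Python's int.bit_length() for a nonnegative int
def pyBitLen : Nat → Nat
  | 0 => 0
  | n+1 => pyBitLen ((n+1)/2) + 1

-- ===== PORT A =====
-- bin(n)[2:] for n ≥ 0.  (For value < 0 Python's bin leaves a 'b' in the sliced string and
-- int(...,2) raises ValueError on almost all masks; those inputs are outside Pre_.)
def binDigits : Nat → List Char
  | 0 => []
  | n+1 => binDigits ((n+1)/2) ++ [if (n+1) % 2 = 1 then '1' else '0']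

def binRepr (n : Nat) : List Char := if n = 0 then ['0'] else binDigits n

-- the `while len(res) < 36: res = ["0"] + res` loop
def padTo36 (l : List Char) : List Char :=
  if l.length < 36 then padTo36 ('0' :: l) else l
termination_by 36 - l.length
decreasing_by simp_all; omega

-- body of `for i in range(len(mask))`: skip 'X', else res[i] = mask[i]
-- (Python raises IndexError when i ≥ len(res); List.set is then a no-op — outside Pre_)
def maskStep (m : List Char) (r : List Char) (i : Nat) : List Char :=
  if m.getD i 'X' = 'X' then r else r.set i (m.getD i 'X')

-- int(s, 2); inside Pre_ every char of the joined list is '0' or '1' (Python raises otherwise)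
def parseBin (l : List Char) : Nat :=
  l.foldl (fun acc c => 2 * acc + (if c = '1' then 1 else 0)) 0

def process (mask : String) (value : Int) : Int :=
  let m := mask.toList
  let res := padTo36 (binRepr value.natAbs)
  let res := (List.range m.length).foldl (maskStep m) res
  Int.ofNat (parseBin res)

-- ===== PORT B =====
-- loop body of Source B: '1' sets a bit of or_mask, '0' clears a bit of and_mask (xor on all-ones)
def altStep (L : Nat) (p : Nat × Nat) (ci : Char × Nat) : Nat × Nat :=
  if ci.1 = '1' then (p.1 ||| (1 <<< (L - 1 - ci.2)), p.2)
  else if ci.1 = '0' then (p.1, p.2 ^^^ (1 <<< (L - 1 - ci.2)))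
  else p

-- faithful for 0 ≤ value (guaranteed by Pre_); zipIdx is Python's enumerate (pair swapped)
def process_alt (mask : String) (value : Int) : Int :=
  let v := value.toNat
  let L := max 36 (pyBitLen v)
  let p := mask.toList.zipIdx.foldl (altStep L) (0, (1 <<< L) - 1)
  Int.ofNat ((v &&& p.2) ||| p.1)

-- ===== PRECONDITION & SPEC =====
-- Pre_ excludes exactly the inputs where A's behaviour is an accident of string/int parsing:
-- negative values (bin() leaves a 'b' in the sliced digit string, so int(...,2) raises
-- ValueError unless the mask happens to overwrite that one character), masks with characters
-- outside {0,1,X} (they normally make int(...,2) raise, except for lenient corner parses such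
-- as '_' or a leading space), and masks longer than the padded string (IndexError).
def Pre_process (mask : String) (value : Int) : Prop :=
  0 ≤ value ∧
  (mask.toList.all fun c => c == '0' || c == '1' || c == 'X') = true ∧
  (mask.length ≤ 36 ∨ 2 ^ (mask.length - 1) ≤ value)
instance (mask : String) (value : Int) : Decidable (Pre_process mask value) := by
  unfold Pre_process; infer_instance

def pvWitness_process : String × Int := ("X1X0", 11)

def Spec_process (mask : String) (value : Int) (out : Int) : Prop := out = process_alt mask value
instance (mask : String) (value : Int) (out : Int) : Decidable (Spec_process mask value out) := by
  unfold Spec_process; infer_instance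

-- ===== CLAIM (what is proved, stated in full; the proofs are below) =====
def Claim_equal_process : Prop := ∀ (mask : String) (value : Int), Dom_process mask value → Pre_process mask value → Spec_process mask value (process mask value)

-- ===== LEMMAS AND PROOFS =====

theorem pyBitLen_lt (n : Nat) : n < 2 ^ pyBitLen n := by
  induction n using pyBitLen.induct with
  | case1 => simp [pyBitLen]
  | case2 n ih =>
    rw [pyBitLen, pow_succ]
    omega

theorem pyBitLen_le_of_lt {n k : Nat} (h : n < 2 ^ k) : pyBitLen n ≤ k := by
  induction n using pyBitLen.induct generalizing k with
  | case1 => simp [pyBitLen]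
  | case2 n ih =>
    rw [pyBitLen]
    cases k with
    | zero => simp at h
    | succ k =>
      have : (n+1)/2 < 2 ^ k := by rw [pow_succ] at h; omega
      exact Nat.succ_le_succ (ih this)

-- getD at an in-range index does not depend on the default
theorem getD_irrel (l : List Char) (i : Nat) (d d' : Char) (h : i < l.length) :
    l.getD i d = l.getD i d' := by
  simp [List.getD_eq_getElem?_getD, List.getElem?_eq_getElem h]

theorem binDigits_length (n : Nat) : (binDigits n).length = pyBitLen n := by
  induction n using binDigits.induct with
  | case1 => simp [binDigits, pyBitLen]
  | case2 n ih => simp [binDigits, pyBitLen, ih]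

theorem binDigits_getD (n : Nat) (j : Nat) (h : j < pyBitLen n) :
    (binDigits n).getD j ' '
      = (if n.testBit (pyBitLen n - 1 - j) then '1' else '0') := by
  induction n using binDigits.induct generalizing j with
  | case1 => simp [pyBitLen] at h
  | case2 n ih =>
    have hlen : pyBitLen (n+1) = pyBitLen ((n+1)/2) + 1 := by rw [pyBitLen]
    have hbd : binDigits (n+1)
        = binDigits ((n+1)/2) ++ [if (n+1) % 2 = 1 then '1' else '0'] := by rw [binDigits]
    rw [hbd]
    rcases Nat.lt_or_ge j (pyBitLen ((n+1)/2)) with hj | hj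
    · rw [List.getD_append _ _ _ _ (by rw [binDigits_length]; exact hj), ih j hj]
      have harith : pyBitLen (n+1) - 1 - j = (pyBitLen ((n+1)/2) - 1 - j) + 1 := by
        rw [hlen]; omega
      rw [harith, Nat.testBit_succ]
    · have hj' : j = pyBitLen ((n+1)/2) := by rw [hlen] at h; omega
      subst hj'
      rw [List.getD_append_right _ _ _ _ (by rw [binDigits_length])]
      rw [binDigits_length, Nat.sub_self]
      have : pyBitLen (n+1) - 1 - pyBitLen ((n+1)/2) = 0 := by rw [hlen]; omega
      rw [this, Nat.testBit_zero]
      simp only [List.getD_cons_zero]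
      rcases Nat.mod_two_eq_zero_or_one (n+1) with hm | hm <;> simp [hm]

theorem padTo36_eq (l : List Char) :
    padTo36 l = List.replicate (36 - l.length) '0' ++ l := by
  induction l using padTo36.induct with
  | case1 l h ih =>
    rw [padTo36, if_pos h, ih]
    have : 36 - l.length = (36 - ('0'::l).length) + 1 := by simp at h ⊢; omega
    rw [this, List.replicate_succ', List.append_assoc]
    simp
  | case2 l h =>
    rw [padTo36, if_neg h]
    have : 36 - l.length = 0 := by simp at h; omega
    simp [this]

theorem padded_length (n : Nat) (hn : n < 2 ^ 36) :
    (padTo36 (binRepr n)).length = 36 := by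
  rw [padTo36_eq]
  have : (binRepr n).length ≤ 36 := by
    unfold binRepr
    split
    · simp
    · rw [binDigits_length]; exact pyBitLen_le_of_lt hn
  simp
  omega

-- position i of the padded string of n < 2^36 holds bit 35 - i
theorem padded_getD (n : Nat) (hn : n < 2 ^ 36) (i : Nat) (hi : i < 36) :
    (padTo36 (binRepr n)).getD i ' ' = (if n.testBit (35 - i) then '1' else '0') := by
  rcases Nat.eq_zero_or_pos n with h0 | hpos
  · subst h0
    have h1 : binRepr 0 = ['0'] := rfl
    rw [h1, padTo36_eq]
    have h2 : List.replicate (36 - List.length ['0']) '0' ++ ['0']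
        = List.replicate 36 '0' := by
      rw [show (36 : Nat) = 35 + 1 from rfl, List.replicate_succ']
      rfl
    rw [h2, List.getD_replicate _ hi, Nat.zero_testBit]
    simp
  · have hne : n ≠ 0 := by omega
    rw [binRepr, if_neg hne, padTo36_eq]
    have hbl : (binDigits n).length ≤ 36 := by
      rw [binDigits_length]; exact pyBitLen_le_of_lt hn
    rcases Nat.lt_or_ge i (36 - (binDigits n).length) with hlt | hge
    · rw [List.getD_append _ _ _ _ (by simpa using hlt), List.getD_replicate _ (by simpa using hlt)]
      have : n.testBit (35 - i) = false := by
        apply Nat.testBit_lt_two_pow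
        calc n < 2 ^ pyBitLen n := pyBitLen_lt n
        _ ≤ 2 ^ (35 - i) := Nat.pow_le_pow_right (by omega)
            (by rw [binDigits_length] at hlt; omega)
      simp [this]
    · have hp1 : 1 ≤ pyBitLen n := by
        rcases Nat.eq_zero_or_pos (pyBitLen n) with h | h
        · have := pyBitLen_lt n; rw [h] at this; simp at this; omega
        · omega
      rw [List.getD_append_right _ _ _ _ (by simpa using hge)]
      simp only [List.length_replicate, binDigits_length]
      rw [binDigits_length] at hbl hge
      rw [binDigits_getD _ _ (by omega)]
      have harith : pyBitLen n - 1 - (i - (36 - pyBitLen n)) = 35 - i := by omega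
      rw [harith]

-- the fold of maskStep keeps the length and sets exactly the non-'X' mask positions
theorem foldl_maskStep_length (m r : List Char) (k : Nat) :
    ((List.range k).foldl (maskStep m) r).length = r.length := by
  induction k with
  | zero => simp
  | succ k ih =>
    rw [List.range_succ, List.foldl_append]
    simp only [List.foldl_cons, List.foldl_nil, maskStep]
    split <;> simp [ih]

theorem foldl_maskStep_getD (m r : List Char) (k : Nat) (j : Nat) (hj : j < r.length) :
    ((List.range k).foldl (maskStep m) r).getD j ' '
      = if j < k ∧ m.getD j 'X' ≠ 'X' then m.getD j 'X' else r.getD j ' ' := by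
  induction k with
  | zero => simp
  | succ k ih =>
    rw [List.range_succ, List.foldl_append]
    simp only [List.foldl_cons, List.foldl_nil, maskStep]
    by_cases hx : m.getD k 'X' = 'X'
    · rw [if_pos hx, ih]
      by_cases hjq : j = k
      · subst hjq
        rw [if_neg (by omega), if_neg (fun h => h.2 hx)]
      · have h2 : (j < k + 1 ∧ m.getD j 'X' ≠ 'X') ↔ (j < k ∧ m.getD j 'X' ≠ 'X') := by
          constructor <;> rintro ⟨h1, h2⟩ <;> exact ⟨by omega, h2⟩
        rw [if_congr h2 rfl rfl]
    · rw [if_neg hx]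
      by_cases hjq : j = k
      · subst hjq
        have hlen : j < ((List.range j).foldl (maskStep m) r).length := by
          rw [foldl_maskStep_length]; exact hj
        rw [List.getD_eq_getElem?_getD, List.getElem?_set_self hlen]
        rw [if_pos ⟨by omega, hx⟩]
        simp
      · rw [List.getD_eq_getElem?_getD, List.getElem?_set_ne (by omega),
            ← List.getD_eq_getElem?_getD, ih]
        have h2 : (j < k + 1 ∧ m.getD j 'X' ≠ 'X') ↔ (j < k ∧ m.getD j 'X' ≠ 'X') := by
          constructor <;> rintro ⟨h1, h2⟩ <;> exact ⟨by omega, h2⟩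
        rw [if_congr h2 rfl rfl]

-- int(s,2) of a list of bits, bit by bit
theorem parseBin_testBit (l : List Char) (j : Nat) :
    (parseBin l).testBit j
      = (decide (j < l.length) && (l.getD (l.length - 1 - j) ' ' == '1')) := by
  induction l using List.reverseRecOn generalizing j with
  | nil => simp [parseBin, Nat.zero_testBit]
  | append_singleton l c ih =>
    have hpar : parseBin (l ++ [c]) = 2 * parseBin l + (if c = '1' then 1 else 0) := by
      simp [parseBin, List.foldl_append]
    rw [hpar]
    cases j with
    | zero =>
      rw [Nat.testBit_zero]
      simp only [List.length_append, List.length_singleton, Nat.sub_zero]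
      rw [List.getD_append_right _ _ _ _ (by omega)]
      have : l.length + 1 - 1 - l.length = 0 := by omega
      rw [this]
      simp only [List.getD_cons_zero]
      by_cases hc : c = '1' <;> simp [hc]
    | succ j =>
      rw [Nat.testBit_succ]
      have hdiv : (2 * parseBin l + (if c = '1' then 1 else 0)) / 2 = parseBin l := by
        split <;> omega
      rw [hdiv, ih]
      simp only [List.length_append, List.length_singleton]
      by_cases hj : j < l.length
      · rw [List.getD_append _ _ _ _ (by omega)]
        have : l.length + 1 - 1 - (j + 1) = l.length - 1 - j := by omega
        rw [this]
        simp [hj, (by omega : j + 1 < l.length + 1)]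
      · simp [hj]

-- invariant transfer for one step of the B-side fold
theorem decide_iff_eq {p q : Prop} [Decidable p] [Decidable q] (h : p ↔ q) : decide p = decide q := by
  simp [h]

theorem or_bit_set (o : Nat) (m : List Char) (k : Nat) (hk : k < 36)
    (hmk : m.getD k ' ' = '1')
    (ho : ∀ j, o.testBit j = (decide (j < 36 ∧ 35 - j < k) && (m.getD (35 - j) ' ' == '1'))) :
    ∀ j, (o ||| 1 <<< (36 - 1 - k)).testBit j
      = (decide (j < 36 ∧ 35 - j < k + 1) && (m.getD (35 - j) ' ' == '1')) := by
  intro j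
  rw [Nat.testBit_lor, ho j, Nat.one_shiftLeft, Nat.testBit_two_pow]
  by_cases hj : j < 36
  · by_cases he : 35 - j = k
    · rw [decide_eq_true (show 36 - 1 - k = j by omega),
          decide_eq_true (show j < 36 ∧ 35 - j < k + 1 from ⟨hj, by omega⟩), he, hmk]
      simp
    · rw [decide_eq_false (show ¬ 36 - 1 - k = j by omega),
          decide_iff_eq (show (j < 36 ∧ 35 - j < k + 1) ↔ (j < 36 ∧ 35 - j < k) by
            constructor <;> rintro ⟨a, b⟩ <;> exact ⟨a, by omega⟩)]
      simp
  · rw [decide_eq_false (show ¬ (j < 36 ∧ 35 - j < k) by omega),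
        decide_eq_false (show ¬ (j < 36 ∧ 35 - j < k + 1) by omega),
        decide_eq_false (show ¬ 36 - 1 - k = j by omega)]
    simp

theorem or_bit_keep (o : Nat) (m : List Char) (k : Nat)
    (hmk : m.getD k ' ' ≠ '1')
    (ho : ∀ j, o.testBit j = (decide (j < 36 ∧ 35 - j < k) && (m.getD (35 - j) ' ' == '1'))) :
    ∀ j, o.testBit j = (decide (j < 36 ∧ 35 - j < k + 1) && (m.getD (35 - j) ' ' == '1')) := by
  intro j
  rw [ho j]
  by_cases hj : j < 36
  · by_cases he : 35 - j = k
    · rw [decide_eq_false (show ¬ (j < 36 ∧ 35 - j < k) by omega), he,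
          beq_eq_false_iff_ne.mpr hmk]
      simp
    · rw [decide_iff_eq (show (j < 36 ∧ 35 - j < k + 1) ↔ (j < 36 ∧ 35 - j < k) by
          constructor <;> rintro ⟨a, b⟩ <;> exact ⟨a, by omega⟩)]
  · rw [decide_eq_false (show ¬ (j < 36 ∧ 35 - j < k) by omega),
        decide_eq_false (show ¬ (j < 36 ∧ 35 - j < k + 1) by omega)]

theorem and_bit_clear (a : Nat) (m : List Char) (k : Nat) (hk : k < 36)
    (hmk : m.getD k ' ' = '0')
    (ha : ∀ j, a.testBit j = (decide (j < 36) && !(decide (35 - j < k) && (m.getD (35 - j) ' ' == '0')))) :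
    ∀ j, (a ^^^ 1 <<< (36 - 1 - k)).testBit j
      = (decide (j < 36) && !(decide (35 - j < k + 1) && (m.getD (35 - j) ' ' == '0'))) := by
  intro j
  rw [Nat.testBit_xor, ha j, Nat.one_shiftLeft, Nat.testBit_two_pow]
  by_cases hj : j < 36
  · by_cases he : 35 - j = k
    · rw [decide_eq_true (show 36 - 1 - k = j by omega), decide_eq_true hj,
          decide_eq_false (show ¬ 35 - j < k by omega),
          decide_eq_true (show 35 - j < k + 1 by omega), he, hmk]
      simp
    · rw [decide_eq_false (show ¬ 36 - 1 - k = j by omega),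
          decide_iff_eq (show (35 - j < k + 1) ↔ (35 - j < k) by
            constructor <;> intro h <;> omega)]
      simp
  · rw [decide_eq_false (show ¬ j < 36 by omega),
        decide_eq_false (show ¬ 36 - 1 - k = j by omega)]
    simp

theorem and_bit_keep (a : Nat) (m : List Char) (k : Nat)
    (hmk : m.getD k ' ' ≠ '0')
    (ha : ∀ j, a.testBit j = (decide (j < 36) && !(decide (35 - j < k) && (m.getD (35 - j) ' ' == '0')))) :
    ∀ j, a.testBit j = (decide (j < 36) && !(decide (35 - j < k + 1) && (m.getD (35 - j) ' ' == '0'))) := by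
  intro j
  rw [ha j]
  by_cases he : 35 - j = k
  · rw [decide_eq_false (show ¬ 35 - j < k by omega), he,
        beq_eq_false_iff_ne.mpr hmk]
    simp
  · rw [decide_iff_eq (show (35 - j < k + 1) ↔ (35 - j < k) by
        constructor <;> intro h <;> omega)]

-- characterization of the B-side fold: processing the suffix t of the mask (starting at
-- index k) on accumulators whose bits are already correct for positions < k yields
-- accumulators whose bits are correct for positions < k + |t|
theorem altFold_bits (m : List Char) (t : List Char) (k : Nat) (o a : Nat)
    (hsuffix : ∀ i, i < t.length → t.getD i ' ' = m.getD (k + i) ' ')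
    (hk : k + t.length ≤ 36)
    (ho : ∀ j, o.testBit j = (decide (j < 36 ∧ 35 - j < k) && (m.getD (35 - j) ' ' == '1')))
    (ha : ∀ j, a.testBit j = (decide (j < 36) && !(decide (35 - j < k) && (m.getD (35 - j) ' ' == '0')))) :
    (∀ j, ((t.zipIdx k).foldl (altStep 36) (o, a)).1.testBit j
        = (decide (j < 36 ∧ 35 - j < k + t.length) && (m.getD (35 - j) ' ' == '1'))) ∧
    (∀ j, ((t.zipIdx k).foldl (altStep 36) (o, a)).2.testBit j
        = (decide (j < 36) && !(decide (35 - j < k + t.length) && (m.getD (35 - j) ' ' == '0')))) := by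
  induction t generalizing k o a with
  | nil =>
    simp only [List.zipIdx_nil, List.foldl_nil, List.length_nil, Nat.add_zero]
    exact ⟨ho, ha⟩
  | cons c t ih =>
    rw [List.zipIdx_cons, List.foldl_cons, show (c::t).length = t.length + 1 from rfl,
        show k + (t.length + 1) = (k + 1) + t.length by omega]
    have hc : c = m.getD k ' ' := by simpa using hsuffix 0 (by simp)
    have hkk : k < 36 := by simp at hk; omega
    have hkt : (k + 1) + t.length ≤ 36 := by simp at hk; omega
    have hsuffix' : ∀ i, i < t.length → t.getD i ' ' = m.getD ((k + 1) + i) ' ' := by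
      intro i hi
      have := hsuffix (i+1) (by simp; omega)
      simpa [Nat.add_assoc, Nat.add_comm 1 i] using this
    by_cases h1 : c = '1'
    · rw [show altStep 36 (o, a) (c, k) = (o ||| 1 <<< (36 - 1 - k), a) by simp [altStep, h1]]
      exact ih (k+1) _ _ hsuffix' hkt
        (or_bit_set o m k hkk (h1 ▸ hc.symm) ho)
        (and_bit_keep a m k (by rw [← hc, h1]; decide) ha)
    · by_cases h0 : c = '0'
      · rw [show altStep 36 (o, a) (c, k) = (o, a ^^^ 1 <<< (36 - 1 - k)) by simp [altStep, h0]]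
        exact ih (k+1) _ _ hsuffix' hkt
          (or_bit_keep o m k (by rw [← hc, h0]; decide) ho)
          (and_bit_clear a m k hkk (h0 ▸ hc.symm) ha)
      · rw [show altStep 36 (o, a) (c, k) = (o, a) by simp [altStep, h1, h0]]
        exact ih (k+1) _ _ hsuffix' hkt
          (or_bit_keep o m k (fun h => h1 (hc.trans h)) ho)
          (and_bit_keep a m k (fun h => h0 (hc.trans h)) ha)

-- ===== VERDICT (by name: the statement is the Claim_ definition above) =====
theorem process_spec : Claim_equal_process := by
  intro mask value hdom hpre
  obtain ⟨hv, hchars, hlenpre⟩ := hpre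
  unfold Spec_process process process_alt
  simp only []
  -- notation
  set m : List Char := mask.toList with hm
  have hub : value ≤ 2147483648 := by
    unfold Dom_process pvDomInt at hdom
    simp at hdom
    exact_mod_cast hdom.2.2
  set n : Nat := value.toNat with hn
  have hnabs : value.natAbs = n := by omega
  have hn32 : n < 2 ^ 32 := by omega
  have hn36 : n < 2 ^ 36 := by omega
  have hbl : pyBitLen n ≤ 32 := pyBitLen_le_of_lt hn32
  have hL : max 36 (pyBitLen n) = 36 := by omega
  have hmlen : m.length = mask.length := String.length_toList
  have hmlen36 : m.length ≤ 36 := by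
    rw [hmlen]
    rcases hlenpre with h | h
    · exact h
    · by_contra h36
      have h1 : (2:Int) ^ 36 ≤ 2 ^ (mask.length - 1) :=
        pow_le_pow_right₀ (by norm_num) (by omega)
      have h2 : (2:Int) ^ 36 = 68719476736 := by norm_num
      omega
  rw [hnabs, hL]
  -- all mask characters are '0', '1' or 'X'
  have hcm : ∀ i, i < m.length → m.getD i ' ' = '0' ∨ m.getD i ' ' = '1' ∨ m.getD i ' ' = 'X' := by
    intro i hi
    have := (List.all_eq_true.mp hchars) (m.getD i ' ') (by
      rw [List.getD_eq_getElem?_getD, List.getElem?_eq_getElem hi]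
      exact List.getElem_mem hi)
    have h' : (m.getD i ' ' = '0' ∨ m.getD i ' ' = '1') ∨ m.getD i ' ' = 'X' := by
      simpa using this
    tauto
  -- A side
  have hplen : (padTo36 (binRepr n)).length = 36 := padded_length n hn36
  have hrlen : ((List.range m.length).foldl (maskStep m) (padTo36 (binRepr n))).length = 36 := by
    rw [foldl_maskStep_length]; exact hplen
  -- B side
  have hfold := altFold_bits m m 0 0 ((1 <<< 36) - 1)
    (by intro i hi; simp)
    (by omega)
    (by intro j; simp [Nat.zero_testBit])
    (by
      intro j
      rw [Nat.one_shiftLeft, Nat.testBit_two_pow_sub_one]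
      simp)
  -- bitwise equality
  congr 1
  apply Nat.eq_of_testBit_eq
  intro j
  rw [parseBin_testBit, hrlen]
  rw [Nat.testBit_lor, Nat.testBit_land, hfold.1 j, hfold.2 j]
  simp only [Nat.zero_add]
  by_cases hj36 : j < 36
  · have hi36 : 35 - j < 36 := by omega
    rw [foldl_maskStep_getD _ _ _ _ (by omega)]
    by_cases him : 35 - j < m.length
    · have hdflt : m.getD (35 - j) 'X' = m.getD (35 - j) ' ' := getD_irrel _ _ _ _ him
      rcases hcm (35 - j) him with hch | hch | hch
      · -- '0' : cleared
        rw [hdflt, hch]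
        simp [hj36, him]
      · -- '1' : set
        rw [hdflt, hch]
        simp [hj36, him]
      · -- 'X' : keep the value bit
        rw [hdflt, hch]
        rw [if_neg (by simp)]
        rw [padded_getD n hn36 _ hi36]
        have : 35 - (35 - j) = j := by omega
        rw [this]
        simp [hj36, him]
        by_cases hb : n.testBit j <;> simp [hb]
    · -- beyond the mask: keep the value bit
      rw [if_neg (by omega)]
      rw [padded_getD n hn36 _ hi36]
      have : 35 - (35 - j) = j := by omega
      rw [this]
      simp [hj36, him]
      by_cases hb : n.testBit j <;> simp [hb]
  · -- high bits: both sides are zero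
    have hnb : n.testBit j = false :=
      Nat.testBit_lt_two_pow (lt_of_lt_of_le hn36 (Nat.pow_le_pow_right (by omega) (by omega)))
    simp [hj36, hnb]
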